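-- pv_equiv track=rewrite | github.com/TheGringo-ai/Aethera | aethera_router.py | _calc_cn_compat
-- ===== SOURCE A (Python) =====
-- _CN_TRIADS = [
--     {"Rat", "Dragon", "Monkey"},
--     {"Ox", "Snake", "Rooster"},
--     {"Tiger", "Horse", "Dog"},
--     {"Rabbit", "Goat", "Pig"},
-- ]
--
-- _CN_CLASHES = [
--     ("Rat", "Horse"), ("Ox", "Goat"), ("Tiger", "Monkey"),
--     ("Rabbit", "Rooster"), ("Dragon", "Dog"), ("Snake", "Pig"),
-- ]
--
-- def _calc_cn_compat(animal1: str, animal2: str) -> int: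
--     """Score Chinese zodiac compatibility 0-20."""
--     if animal1 == animal2:
--         return 14
--     for triad in _CN_TRIADS:
--         if animal1 in triad and animal2 in triad:
--             return 20
--     for clash in _CN_CLASHES:
--         if (animal1 in clash and animal2 in clash):
--             return 2
--     return 10
-- ===== SOURCE B (Python) =====
-- _CN_CYCLE = ["Rat", "Ox", "Tiger", "Rabbit", "Dragon", "Snake",
--              "Horse", "Goat", "Monkey", "Rooster", "Dog", "Pig"]
--
-- def _calc_cn_compat(animal1: str, animal2: str) -> int:
--     """Score Chinese zodiac compatibility 0-20."""
--     if animal1 == animal2: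
--         return 14
--     try:
--         d = (_CN_CYCLE.index(animal1) - _CN_CYCLE.index(animal2)) % 12
--     except ValueError:
--         return 10
--     if d % 4 == 0:
--         return 20
--     if d == 6:
--         return 2
--     return 10
-- ===== Notes on version B (the rewrite author's own statement) =====
-- stated objective: alternative
-- what changed: Replaced A's scans of explicit triad sets and clash pairs with zodiac-cycle arithmetic: both animals are located once in the 12-animal cycle and the score is read off the index difference mod 12 (triad iff d % 4 == 0, clash iff d == 6), with unknown animals falling back to 10.
import Mathlib
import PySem

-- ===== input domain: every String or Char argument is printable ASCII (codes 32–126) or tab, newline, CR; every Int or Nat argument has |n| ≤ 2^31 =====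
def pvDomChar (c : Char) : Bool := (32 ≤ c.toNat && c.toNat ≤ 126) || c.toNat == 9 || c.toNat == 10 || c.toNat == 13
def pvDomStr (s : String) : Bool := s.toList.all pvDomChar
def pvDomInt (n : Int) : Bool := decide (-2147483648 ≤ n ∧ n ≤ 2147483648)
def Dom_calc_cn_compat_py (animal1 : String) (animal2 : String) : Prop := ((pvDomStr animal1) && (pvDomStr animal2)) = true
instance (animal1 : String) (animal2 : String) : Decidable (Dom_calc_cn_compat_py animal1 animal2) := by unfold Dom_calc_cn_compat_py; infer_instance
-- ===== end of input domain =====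

-- B replaces A's table scans with zodiac-cycle arithmetic (index difference mod 12); same values everywhere.

-- ===== PORT A =====
def cnTriads : List (PySem.Set String) :=
  [PySem.Set.ofList ["Rat", "Dragon", "Monkey"],
   PySem.Set.ofList ["Ox", "Snake", "Rooster"],
   PySem.Set.ofList ["Tiger", "Horse", "Dog"],
   PySem.Set.ofList ["Rabbit", "Goat", "Pig"]]

def cnClashes : List (String × String) :=
  [("Rat", "Horse"), ("Ox", "Goat"), ("Tiger", "Monkey"),
   ("Rabbit", "Rooster"), ("Dragon", "Dog"), ("Snake", "Pig")]

def calc_cn_compat_py (animal1 : String) (animal2 : String) : Int :=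
  if animal1 = animal2 then 14
  else if cnTriads.any (fun t => PySem.Set.contains t animal1 && PySem.Set.contains t animal2) then 20
  -- 'x in clash' for a 2-tuple clash is x == clash[0] or x == clash[1]
  else if cnClashes.any (fun c => (animal1 == c.1 || animal1 == c.2) && (animal2 == c.1 || animal2 == c.2)) then 2
  else 10

-- ===== PORT B =====
def cnCycle : List String :=
  ["Rat", "Ox", "Tiger", "Rabbit", "Dragon", "Snake",
   "Horse", "Goat", "Monkey", "Rooster", "Dog", "Pig"]

-- the try/except ValueError around the two .index calls is ported as matching on index?:
-- none (ValueError) on either lookup falls through to 10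
def calc_cn_compat_py_alt (animal1 : String) (animal2 : String) : Int :=
  if animal1 = animal2 then 14
  else
    match PySem.List.index? cnCycle animal1, PySem.List.index? cnCycle animal2 with
    | some i1, some i2 =>
        let d : Int := PySem.Int.mod ((i1 : Int) - (i2 : Int)) 12
        if PySem.Int.mod d 4 = 0 then 20
        else if d = 6 then 2
        else 10
    | _, _ => 10

-- ===== PRECONDITION & SPEC =====
def Spec_calc_cn_compat_py (animal1 : String) (animal2 : String) (out : Int) : Prop := out = calc_cn_compat_py_alt animal1 animal2
instance (animal1 : String) (animal2 : String) (out : Int) : Decidable (Spec_calc_cn_compat_py animal1 animal2 out) := by unfold Spec_calc_cn_compat_py; infer_instance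

-- ===== CLAIM (what is proved, stated in full; the proofs are below) =====
def Claim_equal_calc_cn_compat_py : Prop := ∀ (animal1 : String) (animal2 : String), Dom_calc_cn_compat_py animal1 animal2 → Spec_calc_cn_compat_py animal1 animal2 (calc_cn_compat_py animal1 animal2)

-- ===== LEMMAS AND PROOFS =====

lemma cn_index?_none (a : String) (h : a ∉ cnCycle) :
    PySem.List.index? cnCycle a = none :=
  (PySem.List.index?_eq_none_iff _ _).mpr h

lemma cn_unknown_left (a1 a2 : String) (h : a1 ∉ cnCycle) :
    calc_cn_compat_py a1 a2 = calc_cn_compat_py_alt a1 a2 := by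
  have hg := cn_index?_none a1 h
  simp only [cnCycle, List.mem_cons, List.not_mem_nil, or_false, not_or] at h
  obtain ⟨h1, h2, h3, h4, h5, h6, h7, h8, h9, h10, h11, h12⟩ := h
  simp only [PySem.List.index?_eq_idxOf?] at hg
  simp [calc_cn_compat_py, calc_cn_compat_py_alt, cnTriads, cnClashes, hg,
    PySem.Set.ofList, PySem.Set.add, PySem.Set.contains,
    h1, h2, h3, h4, h5, h6, h7, h8, h9, h10, h11, h12]

lemma cn_unknown_right (a1 a2 : String) (h : a2 ∉ cnCycle) :
    calc_cn_compat_py a1 a2 = calc_cn_compat_py_alt a1 a2 := by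
  have hg := cn_index?_none a2 h
  simp only [cnCycle, List.mem_cons, List.not_mem_nil, or_false, not_or] at h
  obtain ⟨h1, h2, h3, h4, h5, h6, h7, h8, h9, h10, h11, h12⟩ := h
  simp only [PySem.List.index?_eq_idxOf?] at hg
  rcases hcase : List.idxOf? a1 cnCycle with _ | i1 <;>
    simp [calc_cn_compat_py, calc_cn_compat_py_alt, cnTriads, cnClashes, hg, hcase,
      PySem.Set.ofList, PySem.Set.add, PySem.Set.contains,
      h1, h2, h3, h4, h5, h6, h7, h8, h9, h10, h11, h12]

-- ===== VERDICT (by name: the statement is the Claim_ definition above) =====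
theorem calc_cn_compat_py_spec : Claim_equal_calc_cn_compat_py := by
  intro a1 a2 _
  unfold Spec_calc_cn_compat_py
  by_cases h1 : a1 ∈ cnCycle
  · by_cases h2 : a2 ∈ cnCycle
    · fin_cases h1 <;> fin_cases h2 <;> decide
    · exact cn_unknown_right a1 a2 h2
  · exact cn_unknown_left a1 a2 h1
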